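-- pv_equiv track=rewrite | github.com/RobbeW/Data_Statistiek_R | Deel 3 Algoritmiek/01 Lijsten en tuples/Evaluatie/03 Afvlakking/solution/solution.nl.py | aantal_vakjes
-- ===== SOURCE A (Python) =====
-- def aantal_vakjes(lijst):
--     som = 0
--     n = len(lijst)
--     for j in range(1, n):
--         if lijst[j] < lijst[j - 1]:
--             som += lijst[j - 1] - lijst[j]
--             lijst[j] = lijst[j - 1]
--
--     return som
-- ===== SOURCE B (Python) =====
-- def aantal_vakjes(lijst):
--     prefixmax = []
--     m = None
--     for x in lijst:
--         if m is None or x > m: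
--             m = x
--         prefixmax.append(m)
--     som = 0
--     for j in range(len(lijst)):
--         if lijst[j] < prefixmax[j]:
--             som += prefixmax[j] - lijst[j]
--             lijst[j] = prefixmax[j]
--     return som
-- ===== Notes on version B (the rewrite author's own statement) =====
-- stated objective: alternative
-- what changed: B first builds a separate prefix-maximum table in one pass over the values, then a second index pass sums the gaps table[j]-lijst[j] and assigns, instead of A's single pass that reads the just-mutated predecessor lijst[j-1] inline.
import Mathlib
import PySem

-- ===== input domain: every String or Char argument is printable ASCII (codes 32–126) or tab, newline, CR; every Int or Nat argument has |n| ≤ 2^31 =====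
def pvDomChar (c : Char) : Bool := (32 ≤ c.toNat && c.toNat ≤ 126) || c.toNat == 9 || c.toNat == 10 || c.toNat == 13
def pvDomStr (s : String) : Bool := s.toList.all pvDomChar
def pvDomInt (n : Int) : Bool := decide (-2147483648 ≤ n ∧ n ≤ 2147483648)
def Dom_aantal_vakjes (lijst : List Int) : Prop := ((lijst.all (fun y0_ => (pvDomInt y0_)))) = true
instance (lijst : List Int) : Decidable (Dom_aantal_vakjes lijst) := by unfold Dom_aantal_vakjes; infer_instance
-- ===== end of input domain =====

-- B replaces A's single inline read-the-mutated-predecessor pass by a prefix-maximum table pass plus a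
-- summing/assigning pass (objective: alternative decomposition, same cost). A mutates `lijst` in place;
-- B performs the same element-wise mutation; the equivalence proved here is about the return value.

-- ===== PORT A =====
def aantal_vakjes (lijst : List Int) : Int :=
  let n : Int := lijst.length
  ((PySem.List.pyRange 1 n 1).foldl
    (fun (st : Int × List Int) j =>
      if PySem.List.pyGetD st.2 j 0 < PySem.List.pyGetD st.2 (j - 1) 0 then
        (st.1 + (PySem.List.pyGetD st.2 (j - 1) 0 - PySem.List.pyGetD st.2 j 0),
         PySem.List.pySetD st.2 j (PySem.List.pyGetD st.2 (j - 1) 0))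
      else st)
    (0, lijst)).1

-- ===== PORT B =====
def aantal_vakjes_alt (lijst : List Int) : Int :=
  let prefixmax : List Int :=
    (lijst.foldl
      (fun (st : Option Int × List Int) x =>
        let m : Int := match st.1 with
          | none => x
          | some m => if x > m then x else m
        (some m, st.2 ++ [m]))
      (none, [])).2
  ((PySem.List.pyRange 0 (lijst.length : Int) 1).foldl
    (fun (st : Int × List Int) j =>
      if PySem.List.pyGetD st.2 j 0 < PySem.List.pyGetD prefixmax j 0 then
        (st.1 + (PySem.List.pyGetD prefixmax j 0 - PySem.List.pyGetD st.2 j 0),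
         PySem.List.pySetD st.2 j (PySem.List.pyGetD prefixmax j 0))
      else st)
    (0, lijst)).1

-- ===== PRECONDITION & SPEC =====
def Spec_aantal_vakjes (lijst : List Int) (out : Int) : Prop := out = aantal_vakjes_alt lijst
instance (lijst : List Int) (out : Int) : Decidable (Spec_aantal_vakjes lijst out) := by unfold Spec_aantal_vakjes; infer_instance

-- ===== CLAIM (what is proved, stated in full; the proofs are below) =====
def Claim_equal_aantal_vakjes : Prop := ∀ (lijst : List Int), Dom_aantal_vakjes lijst → Spec_aantal_vakjes lijst (aantal_vakjes lijst)

-- ===== LEMMAS AND PROOFS =====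

-- prefix maxima continuing from running maximum m
def pmFrom (m : Int) : List Int → List Int
  | [] => []
  | x :: xs => max m x :: pmFrom (max m x) xs

-- the prefix-maximum table of a list
def pmL : List Int → List Int
  | [] => []
  | x :: xs => x :: pmFrom x xs

theorem pmFrom_length (m : Int) (xs : List Int) : (pmFrom m xs).length = xs.length := by
  induction xs generalizing m with
  | nil => rfl
  | cons x xs ih => simp [pmFrom, ih]

theorem pmL_length (xs : List Int) : (pmL xs).length = xs.length := by
  cases xs with
  | nil => rfl
  | cons x xs => simp [pmL, pmFrom_length]

theorem pmFrom_getD_zero (m : Int) (xs : List Int) (h : xs ≠ []) :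
    (pmFrom m xs).getD 0 0 = max m (xs.getD 0 0) := by
  cases xs with
  | nil => exact absurd rfl h
  | cons x xs => simp [pmFrom]

theorem pmFrom_getD_succ (xs : List Int) (m : Int) (k : Nat) (h : k + 1 < xs.length) :
    (pmFrom m xs).getD (k + 1) 0 = max ((pmFrom m xs).getD k 0) (xs.getD (k + 1) 0) := by
  induction xs generalizing m k with
  | nil => simp at h
  | cons x xs ih =>
    cases k with
    | zero =>
      have hne : xs ≠ [] := by
        cases xs with
        | nil => simp at h
        | cons _ _ => simp
      simp only [pmFrom, List.getD_cons_succ, List.getD_cons_zero]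
      rw [pmFrom_getD_zero (max m x) xs hne]
    | succ k =>
      have h' : k + 1 < xs.length := by simpa using h
      simp only [pmFrom, List.getD_cons_succ]
      exact ih (max m x) k h' 

theorem pmL_getD_succ (xs : List Int) (k : Nat) (h : k + 1 < xs.length) :
    (pmL xs).getD (k + 1) 0 = max ((pmL xs).getD k 0) (xs.getD (k + 1) 0) := by
  cases xs with
  | nil => simp at h
  | cons x xs =>
    cases k with
    | zero =>
      have hne : xs ≠ [] := by
        cases xs with
        | nil => simp at h
        | cons _ _ => simp
      simp only [pmL, List.getD_cons_succ, List.getD_cons_zero]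
      rw [pmFrom_getD_zero x xs hne]
    | succ k =>
      have h' : k + 1 < xs.length := by simpa using h
      simp only [pmL, List.getD_cons_succ]
      exact pmFrom_getD_succ xs x k h' 

theorem getD_le_pmL (xs : List Int) (k : Nat) (h : k < xs.length) :
    xs.getD k 0 ≤ (pmL xs).getD k 0 := by
  cases k with
  | zero =>
    cases xs with
    | nil => simp at h
    | cons x xs => simp [pmL]
  | succ k =>
    rw [pmL_getD_succ xs k h]
    exact le_max_right _ _

-- the invariant state: the first k cells overwritten by the prefix maxima
def invL (xs : List Int) (k : Nat) : List Int := (pmL xs).take k ++ xs.drop k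

-- the invariant sum
def invS (xs : List Int) (k : Nat) : Int := ((pmL xs).take k).sum - (xs.take k).sum

theorem sum_take_succ (ys : List Int) (k : Nat) (h : k < ys.length) :
    (ys.take (k + 1)).sum = (ys.take k).sum + ys.getD k 0 := by
  rw [List.take_add_one, List.getElem?_eq_getElem h, Option.toList_some, List.sum_append,
    List.sum_cons, List.sum_nil, List.getD_eq_getElem?_getD, List.getElem?_eq_getElem h,
    Option.getD_some, add_zero]

theorem invL_getD_self (xs : List Int) (k : Nat) (h : k < xs.length) :
    (invL xs k).getD k 0 = xs.getD k 0 := by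
  have hk : k ≤ (pmL xs).length := by rw [pmL_length]; omega
  unfold invL
  rw [List.getD_eq_getElem?_getD, List.getD_eq_getElem?_getD,
    List.getElem?_append_right (by rw [List.length_take]; omega)]
  simp [List.length_take, Nat.min_eq_left hk, List.getElem?_drop]

theorem invL_getD_prev (xs : List Int) (k j : Nat) (hj : j < k) (h : k ≤ xs.length) :
    (invL xs k).getD j 0 = (pmL xs).getD j 0 := by
  unfold invL
  rw [List.getD_eq_getElem?_getD, List.getD_eq_getElem?_getD,
    List.getElem?_append_left (by simp [List.length_take, pmL_length]; omega)]
  rw [List.getElem?_take_of_lt hj]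

theorem invL_set (xs : List Int) (k : Nat) (h : k < xs.length) (v : Int) :
    (invL xs k).set k v = (pmL xs).take k ++ v :: xs.drop (k + 1) := by
  have hk : k ≤ (pmL xs).length := by rw [pmL_length]; omega
  unfold invL
  rw [List.drop_eq_getElem_cons h, List.set_append]
  rw [if_neg (by rw [List.length_take]; omega)]
  simp only [List.length_take, Nat.min_eq_left hk, Nat.sub_self, List.set_cons_zero]

theorem invL_succ (xs : List Int) (k : Nat) (h : k < xs.length) :
    invL xs (k + 1) = (pmL xs).take k ++ (pmL xs).getD k 0 :: xs.drop (k + 1) := by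
  have hk : k < (pmL xs).length := by rw [pmL_length]; omega
  unfold invL
  rw [List.take_add_one, List.getElem?_eq_getElem hk, Option.toList_some, List.append_assoc,
    List.singleton_append, List.getD_eq_getElem?_getD, List.getElem?_eq_getElem hk,
    Option.getD_some]

theorem invS_succ (xs : List Int) (k : Nat) (h : k < xs.length) :
    invS xs (k + 1) = invS xs k + ((pmL xs).getD k 0 - xs.getD k 0) := by
  have hk : k < (pmL xs).length := by rw [pmL_length]; omega
  unfold invS
  rw [sum_take_succ _ _ hk, sum_take_succ _ _ h]
  ring

-- ---- A's loop invariant ----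

theorem A_inv (xs : List Int) (k : Nat) (h1 : 1 ≤ k) (h2 : k ≤ xs.length) :
    (PySem.List.pyRange 1 (k : Int) 1).foldl
      (fun (st : Int × List Int) j =>
        if PySem.List.pyGetD st.2 j 0 < PySem.List.pyGetD st.2 (j - 1) 0 then
          (st.1 + (PySem.List.pyGetD st.2 (j - 1) 0 - PySem.List.pyGetD st.2 j 0),
           PySem.List.pySetD st.2 j (PySem.List.pyGetD st.2 (j - 1) 0))
        else st)
      (0, xs) = (invS xs k, invL xs k) := by
  induction k with
  | zero => omega
  | succ k ih =>
    cases Nat.eq_or_lt_of_le h1 with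
    | inl h1' =>
      -- k + 1 = 1 : empty range, initial state
      have hk0 : k = 0 := by omega
      subst hk0
      rw [PySem.List.pyRange_one_eq_nil (by norm_num)]
      obtain ⟨x, xs', rfl⟩ : ∃ x xs', xs = x :: xs' := by
        cases xs with
        | nil => simp at h2
        | cons x xs' => exact ⟨x, xs', rfl⟩
      simp [invS, invL, pmL, List.foldl]
    | inr h1' =>
      have hk1 : 1 ≤ k := by omega
      have hklt : k < xs.length := by omega
      have hcast : ((k : Int) + 1) = ((k + 1 : Nat) : Int) := by push_cast; ring
      rw [← hcast, PySem.List.pyRange_one_succ_right (by exact_mod_cast hk1), List.foldl_append,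
        ih hk1 (by omega)]
      simp only [List.foldl]
      have hjk : ((k : Int) - 1) = ((k - 1 : Nat) : Int) := by omega
      rw [hjk]
      rw [PySem.List.pyGetD_natCast, PySem.List.pyGetD_natCast, PySem.List.pySetD_natCast]
      rw [invL_getD_self xs k hklt, invL_getD_prev xs k (k - 1) (by omega) (by omega)]
      have hpm : (pmL xs).getD k 0 = max ((pmL xs).getD (k - 1) 0) (xs.getD k 0) := by
        have := pmL_getD_succ xs (k - 1) (by omega)
        rwa [Nat.sub_add_cancel hk1] at this
      by_cases hcmp : xs.getD k 0 < (pmL xs).getD (k - 1) 0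
      · rw [if_pos hcmp]
        have hpm' : (pmL xs).getD k 0 = (pmL xs).getD (k - 1) 0 := by
          rw [hpm, max_eq_left (le_of_lt hcmp)]
        rw [invL_set xs k hklt, invL_succ xs k hklt, invS_succ xs k hklt, hpm']
      · rw [if_neg hcmp]
        have hpm' : (pmL xs).getD k 0 = xs.getD k 0 := by
          rw [hpm, max_eq_right (by omega)]
        rw [invS_succ xs k hklt, invL_succ xs k hklt, hpm']
        rw [invL, List.drop_eq_getElem_cons hklt]
        simp [List.getD_eq_getElem?_getD, List.getElem?_eq_getElem hklt]

-- ---- B's prefix-maximum builder equals pmFrom / pmL ----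

def lastM (m : Int) : List Int → Int
  | [] => m
  | x :: xs => lastM (max m x) xs

theorem B_build_from (xs : List Int) (m : Int) (acc : List Int) :
    xs.foldl
      (fun (st : Option Int × List Int) x =>
        let m : Int := match st.1 with
          | none => x
          | some m => if x > m then x else m
        (some m, st.2 ++ [m]))
      (some m, acc) = (some (lastM m xs), acc ++ pmFrom m xs) := by
  induction xs generalizing m acc with
  | nil => simp [lastM, pmFrom]
  | cons x xs ih =>
    have hmx : (if x > m then x else m) = max m x := by
      by_cases h : x ≤ m
      · rw [if_neg (by omega), max_eq_left h]
      · rw [if_pos (by omega), max_eq_right (by omega)]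
    simp only [List.foldl, hmx, ih (max m x) (acc ++ [max m x])]
    simp [lastM, pmFrom]

theorem B_build (xs : List Int) :
    (xs.foldl
      (fun (st : Option Int × List Int) x =>
        let m : Int := match st.1 with
          | none => x
          | some m => if x > m then x else m
        (some m, st.2 ++ [m]))
      (none, [])).2 = pmL xs := by
  cases xs with
  | nil => rfl
  | cons x xs =>
    exact (congrArg Prod.snd (B_build_from xs x [x])).trans (by simp [pmL])

-- ---- B's loop invariant ----

theorem B_inv (xs : List Int) (k : Nat) (h2 : k ≤ xs.length) :
    (PySem.List.pyRange 0 (k : Int) 1).foldl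
      (fun (st : Int × List Int) j =>
        if PySem.List.pyGetD st.2 j 0 < PySem.List.pyGetD (pmL xs) j 0 then
          (st.1 + (PySem.List.pyGetD (pmL xs) j 0 - PySem.List.pyGetD st.2 j 0),
           PySem.List.pySetD st.2 j (PySem.List.pyGetD (pmL xs) j 0))
        else st)
      (0, xs) = (invS xs k, invL xs k) := by
  induction k with
  | zero =>
    rw [PySem.List.pyRange_one_eq_nil (by norm_num)]
    simp [invS, invL]
  | succ k ih =>
    have hklt : k < xs.length := by omega
    have hcast : ((k : Int) + 1) = ((k + 1 : Nat) : Int) := by push_cast; ring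
    rw [← hcast, PySem.List.pyRange_one_succ_right (by positivity), List.foldl_append,
      ih (by omega)]
    simp only [List.foldl]
    rw [PySem.List.pyGetD_natCast, PySem.List.pyGetD_natCast, PySem.List.pySetD_natCast]
    rw [invL_getD_self xs k hklt]
    by_cases hcmp : xs.getD k 0 < (pmL xs).getD k 0
    · rw [if_pos hcmp]
      rw [invL_set xs k hklt, invL_succ xs k hklt, invS_succ xs k hklt]
    · rw [if_neg hcmp]
      have heq : (pmL xs).getD k 0 = xs.getD k 0 :=
        le_antisymm (by omega) (getD_le_pmL xs k hklt)
      rw [invS_succ xs k hklt, invL_succ xs k hklt, heq]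
      rw [invL, List.drop_eq_getElem_cons hklt]
      simp [List.getD_eq_getElem?_getD, List.getElem?_eq_getElem hklt]

-- ===== VERDICT (by name: the statement is the Claim_ definition above) =====
theorem aantal_vakjes_spec : Claim_equal_aantal_vakjes := by
  intro lijst _
  show aantal_vakjes lijst = aantal_vakjes_alt lijst
  unfold aantal_vakjes aantal_vakjes_alt
  rw [B_build]
  cases lijst with
  | nil => rfl
  | cons x xs =>
    have hlen : 1 ≤ (x :: xs).length := by simp
    show ((PySem.List.pyRange 1 (((x :: xs).length : Nat) : Int) 1).foldl
        (fun (st : Int × List Int) j =>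
          if PySem.List.pyGetD st.2 j 0 < PySem.List.pyGetD st.2 (j - 1) 0 then
            (st.1 + (PySem.List.pyGetD st.2 (j - 1) 0 - PySem.List.pyGetD st.2 j 0),
             PySem.List.pySetD st.2 j (PySem.List.pyGetD st.2 (j - 1) 0))
          else st)
        (0, x :: xs)).1 =
      ((PySem.List.pyRange 0 (((x :: xs).length : Nat) : Int) 1).foldl
        (fun (st : Int × List Int) j =>
          if PySem.List.pyGetD st.2 j 0 < PySem.List.pyGetD (pmL (x :: xs)) j 0 then
            (st.1 + (PySem.List.pyGetD (pmL (x :: xs)) j 0 - PySem.List.pyGetD st.2 j 0),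
             PySem.List.pySetD st.2 j (PySem.List.pyGetD (pmL (x :: xs)) j 0))
          else st)
        (0, x :: xs)).1
    rw [A_inv (x :: xs) (x :: xs).length hlen le_rfl,
      B_inv (x :: xs) (x :: xs).length le_rfl]
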